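-- pv_equiv track=rewrite | github.com/andrewburry/LowPolyfy | lowpolyfy/utils/slice_utils.py | check_frame_bounded
-- ===== SOURCE A (Python) =====
-- def check_frame_bounded(points, frame_number):
--     # Ensure that points are crossing the frame number at least once
--     lower_bounded = False
--     upper_bounded = False
--     for point in points:
--         if point[0] <= frame_number:
--             lower_bounded = True
--         elif point[0] > frame_number:
--             upper_bounded = True
--
--     return lower_bounded and upper_bounded
-- ===== SOURCE B (Python) =====
-- def check_frame_bounded(points, frame_number):
--     # Points straddle frame_number iff some x is <= it and some x is > it:
--     # equivalently min(xs) <= frame_number < max(xs) on a nonempty list.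
--     xs = [p[0] for p in points]
--     return bool(xs) and min(xs) <= frame_number and max(xs) > frame_number
-- ===== Notes on version B (the rewrite author's own statement) =====
-- stated objective: simpler
-- what changed: Replaced the two-flag accumulating scan with extremum aggregation: collect x-coordinates once and compare min and max against frame_number.
import Mathlib
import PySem

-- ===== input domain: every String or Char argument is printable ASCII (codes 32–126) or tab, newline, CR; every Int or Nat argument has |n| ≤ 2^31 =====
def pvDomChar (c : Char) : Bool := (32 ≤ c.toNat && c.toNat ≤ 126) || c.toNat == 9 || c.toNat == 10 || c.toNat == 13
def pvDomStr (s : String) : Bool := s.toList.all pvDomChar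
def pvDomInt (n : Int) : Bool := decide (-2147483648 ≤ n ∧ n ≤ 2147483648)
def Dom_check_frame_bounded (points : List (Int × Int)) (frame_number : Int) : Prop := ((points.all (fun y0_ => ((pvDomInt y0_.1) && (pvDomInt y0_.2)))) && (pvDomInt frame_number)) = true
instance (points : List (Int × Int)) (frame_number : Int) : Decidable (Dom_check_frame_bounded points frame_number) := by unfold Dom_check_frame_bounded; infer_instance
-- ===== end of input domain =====

-- B replaces A's two-flag accumulating scan by extremum aggregation (min/max of the x-coordinates); objective: simpler.


-- ===== PORT A =====
-- Literal port: fold the two flags (lower_bounded, upper_bounded) over the points, same branch order.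
def check_frame_bounded (points : List (Int × Int)) (frame_number : Int) : Bool :=
  let st := points.foldl
    (fun (st : Bool × Bool) point =>
      if point.1 ≤ frame_number then (true, st.2)
      else if point.1 > frame_number then (st.1, true)
      else st)
    (false, false)
  st.1 && st.2

-- ===== PORT B =====
-- Literal port of Source B: build xs once, then compare min(xs)/max(xs) against frame_number.
def check_frame_bounded_alt (points : List (Int × Int)) (frame_number : Int) : Bool :=
  let xs := points.map Prod.fst
  match xs with
  | [] => false
  | h :: t => decide (t.foldl min h ≤ frame_number) && decide (t.foldl max h > frame_number)

-- ===== PRECONDITION & SPEC =====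
def Spec_check_frame_bounded (points : List (Int × Int)) (frame_number : Int) (out : Bool) : Prop := out = check_frame_bounded_alt points frame_number
instance (points : List (Int × Int)) (frame_number : Int) (out : Bool) : Decidable (Spec_check_frame_bounded points frame_number out) := by unfold Spec_check_frame_bounded; infer_instance

-- ===== CLAIM (what is proved, stated in full; the proofs are below) =====
def Claim_equal_check_frame_bounded : Prop := ∀ (points : List (Int × Int)) (frame_number : Int), Dom_check_frame_bounded points frame_number → Spec_check_frame_bounded points frame_number (check_frame_bounded points frame_number)

-- ===== LEMMAS AND PROOFS =====

theorem cfb_fold (fn : Int) (l : List (Int × Int)) (lb ub : Bool) :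
    l.foldl
      (fun (st : Bool × Bool) point =>
        if point.1 ≤ fn then (true, st.2)
        else if point.1 > fn then (st.1, true)
        else st)
      (lb, ub)
    = (lb || l.any (fun p => decide (p.1 ≤ fn)), ub || l.any (fun p => decide (p.1 > fn))) := by
  induction l generalizing lb ub with
  | nil => simp
  | cons p l ih =>
    by_cases h : p.1 ≤ fn
    · have h2 : ¬ fn < p.1 := by omega
      simp [h, h2, ih]
    · have h' : p.1 > fn := by omega
      simp [h, h', ih]

theorem foldl_min_le (fn : Int) (t : List Int) (h : Int) :
    (t.foldl min h ≤ fn) ↔ (h ≤ fn ∨ ∃ x ∈ t, x ≤ fn) := by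
  induction t generalizing h with
  | nil => simp
  | cons a t ih =>
    simp only [List.foldl_cons, ih, min_le_iff]
    constructor
    · rintro (⟨h1 | h1⟩ | ⟨x, hx, hx'⟩)
      · exact Or.inl h1
      · exact Or.inr ⟨a, by simp, h1⟩
      · exact Or.inr ⟨x, by simp [hx], hx'⟩
    · rintro (h1 | ⟨x, hx, hx'⟩)
      · exact Or.inl (Or.inl h1)
      · rcases List.mem_cons.mp hx with rfl | hx
        · exact Or.inl (Or.inr hx')
        · exact Or.inr ⟨x, hx, hx'⟩

theorem foldl_max_gt (fn : Int) (t : List Int) (h : Int) :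
    (fn < t.foldl max h) ↔ (fn < h ∨ ∃ x ∈ t, fn < x) := by
  induction t generalizing h with
  | nil => simp
  | cons a t ih =>
    simp only [List.foldl_cons, ih, lt_max_iff]
    constructor
    · rintro (⟨h1 | h1⟩ | ⟨x, hx, hx'⟩)
      · exact Or.inl h1
      · exact Or.inr ⟨a, by simp, h1⟩
      · exact Or.inr ⟨x, by simp [hx], hx'⟩
    · rintro (h1 | ⟨x, hx, hx'⟩)
      · exact Or.inl (Or.inl h1)
      · rcases List.mem_cons.mp hx with rfl | hx
        · exact Or.inl (Or.inr hx')
        · exact Or.inr ⟨x, hx, hx'⟩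

-- ===== VERDICT (by name: the statement is the Claim_ definition above) =====
theorem check_frame_bounded_spec : Claim_equal_check_frame_bounded := by
  intro points fn _
  unfold Spec_check_frame_bounded check_frame_bounded check_frame_bounded_alt
  rw [cfb_fold]
  cases points with
  | nil => simp
  | cons p l =>
    simp only [List.map_cons, Bool.false_or]
    have h1 : ((p :: l).any (fun q => decide (q.1 ≤ fn))) = decide ((l.map Prod.fst).foldl min p.1 ≤ fn) := by
      rw [Bool.eq_iff_iff]; simp [foldl_min_le]
    have h2 : ((p :: l).any (fun q => decide (q.1 > fn))) = decide ((l.map Prod.fst).foldl max p.1 > fn) := by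
      rw [Bool.eq_iff_iff]; simp [foldl_max_gt]
    rw [h1, h2]
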